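-- pv_equiv track=rewrite | github.com/justNoahH/life_game | life_game.py | ajoute_couronne
-- ===== SOURCE A (Python) =====
-- def ajoute_couronne(tab):
--     """
--     Retourne un nouveau tableau construit sur tab sur
--     lequel on a ajouté une couronne de 0
--     """
--     nb_line = len(tab)
--     nb_col = len(tab[0])
--     T = [[0 for col in range(nb_col+2)] for line in range(nb_line+2)]
--     for i in range(nb_line):
--         for j in range(nb_col):
--             T[i+1][j+1] = tab[i][j]
--     return T
-- ===== SOURCE B (Python) =====
-- def ajoute_couronne(tab):
--     """
--     Retourne un nouveau tableau construit sur tab sur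
--     lequel on a ajoute une couronne de 0
--     """
--     nb_line = len(tab)
--     nb_col = len(tab[0])
--
--     def border(rows, width):
--         z = [0] * width
--         return [z] + rows + [z]
--
--     # work column-wise: extract the columns, add a zero column on each side,
--     # transpose back, then add a zero row on each side
--     cols = [[row[j] for row in tab] for j in range(nb_col)]
--     padded_cols = border(cols, nb_line)
--     return border([list(t) for t in zip(*padded_cols)], nb_col + 2)
-- ===== Notes on version B (the rewrite author's own statement) =====
-- stated objective: alternative
-- what changed: B works column-wise instead of cell-wise: it extracts the columns of tab (a transpose), appends a zero column on each side, transposes back with zip(*...), and then appends a zero row on each side, replacing A's preallocated (n+2)x(m+2) zero matrix with nested per-cell overwrites.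
import Mathlib
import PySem

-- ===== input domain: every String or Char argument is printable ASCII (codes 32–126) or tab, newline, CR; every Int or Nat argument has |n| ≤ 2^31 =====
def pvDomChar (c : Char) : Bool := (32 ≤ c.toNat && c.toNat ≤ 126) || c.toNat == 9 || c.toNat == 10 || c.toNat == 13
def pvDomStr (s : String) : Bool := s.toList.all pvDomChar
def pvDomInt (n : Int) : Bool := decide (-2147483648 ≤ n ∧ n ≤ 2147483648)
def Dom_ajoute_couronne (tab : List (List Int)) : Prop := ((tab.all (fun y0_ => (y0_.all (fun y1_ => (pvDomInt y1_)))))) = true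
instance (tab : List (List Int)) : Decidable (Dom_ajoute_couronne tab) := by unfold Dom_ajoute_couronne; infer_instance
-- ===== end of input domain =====

-- B pads column-wise: extract the columns, add a zero column on each side, transpose
-- back with zip(*...), then add a zero row on each side (an alternative algorithm to
-- A's preallocated zero matrix with nested per-cell overwrites).

-- ===== PORT A =====
-- Literal port of A: build a (nb_line+2) × (nb_col+2) zero matrix, then overwrite
-- T[i+1][j+1] with tab[i][j] in nested index loops (the getD defaults only fire
-- where Python A would raise IndexError, i.e. outside Pre_).
def ajoute_couronne (tab : List (List Int)) : List (List Int) :=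
  let nb_line := tab.length
  let nb_col := (tab.headD []).length
  let T := (List.range (nb_line + 2)).map (fun _ => (List.range (nb_col + 2)).map (fun _ => (0 : Int)))
  (List.range nb_line).foldl (fun T i =>
    (List.range nb_col).foldl (fun T j =>
      T.set (i + 1) ((T.getD (i + 1) []).set (j + 1) ((tab.getD i []).getD j 0))) T) T

-- ===== PORT B =====
-- border(rows, width) = [ [0]*width ] + rows + [ [0]*width ]
def pvBorder (rows : List (List Int)) (width : Nat) : List (List Int) :=
  [List.replicate width (0 : Int)] ++ rows ++ [List.replicate width (0 : Int)]

-- length of Python's zip(*ls): the minimum row length (0 when ls is empty)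
def pvZipLen (ls : List (List Int)) : Nat :=
  match ls with
  | [] => 0
  | x :: xs => xs.foldl (fun m l => min m l.length) x.length

-- Literal port of B: columns of tab (row.getD only defaults where Python's row[j]
-- would raise IndexError, i.e. outside Pre_), zero column on each side, transpose
-- back (zip truncates to the shortest, hence pvZipLen), zero row on each side.
def ajoute_couronne_alt (tab : List (List Int)) : List (List Int) :=
  let nb_line := tab.length
  let nb_col := (tab.headD []).length
  let cols := (List.range nb_col).map (fun j => tab.map (fun row => row.getD j 0))
  let padded_cols := pvBorder cols nb_line
  pvBorder ((List.range (pvZipLen padded_cols)).map (fun i => padded_cols.map (fun c => c.getD i 0))) (nb_col + 2)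

-- ===== PRECONDITION & SPEC =====
-- Pre_ excludes exactly the inputs on which Python A raises IndexError (B raises
-- there too): the empty tab (tab[0]) and tabs with a row shorter than the first row.
def Pre_ajoute_couronne (tab : List (List Int)) : Prop :=
  tab ≠ [] ∧ ∀ row ∈ tab, (tab.headD []).length ≤ row.length
instance (tab : List (List Int)) : Decidable (Pre_ajoute_couronne tab) := by
  unfold Pre_ajoute_couronne; infer_instance

def pvWitness_ajoute_couronne : List (List Int) := [[1, 2], [3, 4], [5, 6]]

def Spec_ajoute_couronne (tab : List (List Int)) (out : List (List Int)) : Prop := out = ajoute_couronne_alt tab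
instance (tab : List (List Int)) (out : List (List Int)) : Decidable (Spec_ajoute_couronne tab out) := by unfold Spec_ajoute_couronne; infer_instance

-- ===== CLAIM (what is proved, stated in full; the proofs are below) =====
def Claim_equal_ajoute_couronne : Prop := ∀ (tab : List (List Int)), Dom_ajoute_couronne tab → Pre_ajoute_couronne tab → Spec_ajoute_couronne tab (ajoute_couronne tab)

-- ===== LEMMAS AND PROOFS =====

-- setting a position to the value already there is the identity
theorem pv_set_self (T : List (List Int)) (k : Nat) (hk : k < T.length) :
    T.set k (T.getD k []) = T := by
  rw [List.getD_eq_getElem T [] hk]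
  exact List.set_getElem_self hk

-- set at the boundary of an append
theorem pv_set_append_len {a : Type} (l1 l2 : List a) (v : a) :
    (l1 ++ l2).set l1.length v = l1 ++ l2.set 0 v := by
  induction l1 with
  | nil => simp
  | cons x t ih => simp [ih]

-- the inner per-cell fold only edits row k: hoist it out of the matrix
theorem pv_fold_row (k : Nat) (L : List Nat) (g : Nat → Nat) (h : Nat → Int)
    (T : List (List Int)) (hk : k < T.length) :
    L.foldl (fun T j => T.set k ((T.getD k []).set (g j) (h j))) T
      = T.set k (L.foldl (fun r j => r.set (g j) (h j)) (T.getD k [])) := by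
  induction L generalizing T with
  | nil => simp only [List.foldl_nil]; exact (pv_set_self T k hk).symm
  | cons a t ih =>
      simp only [List.foldl_cons]
      rw [ih _ (by simpa using hk)]
      have hg : (T.set k ((T.getD k []).set (g a) (h a))).getD k []
          = (T.getD k []).set (g a) (h a) := by
        rw [List.getD_eq_getElem _ [] (by simpa using hk)]
        simp [List.getElem_set_self]
      rw [hg, List.set_set]

-- filling positions 1..m of a zero row of length n+2 with row[0..m-1]
theorem pv_fill_row (row : List Int) (n m : Nat) (hm : m ≤ n) :
    (List.range m).foldl (fun r j => r.set (j + 1) (row.getD j 0))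
        (List.replicate (n + 2) (0 : Int))
      = [(0 : Int)] ++ (List.range m).map (fun j => row.getD j 0)
          ++ List.replicate (n + 1 - m) (0 : Int) := by
  induction m with
  | zero => simp [List.replicate_succ]
  | succ m ih =>
      rw [List.range_succ, List.foldl_append, ih (by omega), List.foldl_cons, List.foldl_nil]
      have hshape : [(0 : Int)] ++ (List.range m).map (fun j => row.getD j 0)
            ++ List.replicate (n + 1 - m) (0 : Int)
          = ([(0 : Int)] ++ (List.range m).map (fun j => row.getD j 0))
            ++ List.replicate (n + 1 - m) (0 : Int) := by simp
      have hlen : ([(0 : Int)] ++ (List.range m).map (fun j => row.getD j 0)).length = m + 1 := by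
        simp
      rw [hshape, ← hlen, pv_set_append_len]
      have hrep : (List.replicate (n + 1 - m) (0 : Int)).set 0 (row.getD m 0)
          = row.getD m 0 :: List.replicate (n - m) (0 : Int) := by
        have h1 : n + 1 - m = (n - m) + 1 := by omega
        rw [h1, List.replicate_succ]; rfl
      rw [hrep]
      simp only [List.map_append, List.map_cons, List.map_nil, hlen]
      have h1 : n + 1 - (m + 1) = n - m := by omega
      simp [h1]

-- range-indexed map over a list is map
theorem pv_map_range_getD (l : List (List Int)) (g : List Int → List Int) :
    (List.range l.length).map (fun i => g (l.getD i [])) = l.map g := by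
  apply List.ext_getElem (by simp)
  intro i h1 h2
  have h3 : i < l.length := by simpa using h2
  simp [List.getD, List.getElem?_eq_getElem h3]

-- the outer loop invariant of A: after m rows, the grid is border ++ padded rows ++ zero rows
theorem pv_outer (tab : List (List Int)) (nc m : Nat) (hm : m ≤ tab.length) :
    (List.range m).foldl (fun T i =>
        (List.range nc).foldl (fun T j =>
          T.set (i + 1) ((T.getD (i + 1) []).set (j + 1) ((tab.getD i []).getD j 0))) T)
      (List.replicate (tab.length + 2) (List.replicate (nc + 2) (0 : Int)))
    = [List.replicate (nc + 2) (0 : Int)]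
        ++ (List.range m).map (fun i =>
              [(0 : Int)] ++ (List.range nc).map (fun j => (tab.getD i []).getD j 0) ++ [(0 : Int)])
        ++ List.replicate (tab.length + 1 - m) (List.replicate (nc + 2) (0 : Int)) := by
  induction m with
  | zero => simp [List.replicate_succ]
  | succ m ih =>
      rw [List.range_succ, List.foldl_append, ih (by omega), List.foldl_cons, List.foldl_nil]
      set b := List.replicate (nc + 2) (0 : Int) with hb
      set pads := (List.range m).map (fun i =>
        [(0 : Int)] ++ (List.range nc).map (fun j => (tab.getD i []).getD j 0) ++ [(0 : Int)]) with hp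
      have hplen : pads.length = m := by simp [hp]
      have hlen1 : ([b] ++ pads).length = m + 1 := by simp [hplen]
      have hrep1 : List.replicate (tab.length + 1 - m) b
          = b :: List.replicate (tab.length - m) b := by
        have h1 : tab.length + 1 - m = (tab.length - m) + 1 := by omega
        rw [h1, List.replicate_succ]
      have hTlen : ([b] ++ pads ++ List.replicate (tab.length + 1 - m) b).length
          = tab.length + 2 := by simp [hplen]; omega
      have hk : m + 1 < ([b] ++ pads ++ List.replicate (tab.length + 1 - m) b).length := by
        rw [hTlen]; omega
      rw [pv_fold_row (m + 1) _ _ _ _ hk]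
      have hget : ([b] ++ pads ++ List.replicate (tab.length + 1 - m) b).getD (m + 1) [] = b := by
        rw [show [b] ++ pads ++ List.replicate (tab.length + 1 - m) b
              = ([b] ++ pads) ++ List.replicate (tab.length + 1 - m) b by simp]
        rw [List.getD_eq_getElem _ [] (by simp [hplen]; omega)]
        rw [List.getElem_append_right (by simp [hplen])]
        simp [hplen, hrep1]
      rw [hget, hb, pv_fill_row _ nc nc (le_refl nc)]
      rw [show [b] ++ pads ++ List.replicate (tab.length + 1 - m) b
            = ([b] ++ pads) ++ List.replicate (tab.length + 1 - m) b by simp]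
      rw [show m + 1 = ([b] ++ pads).length from hlen1.symm, pv_set_append_len]
      rw [hrep1]
      simp only [List.map_append, List.map_cons, List.map_nil, hlen1]
      have h2 : tab.length + 1 - (m + 1) = tab.length - m := by omega
      simp [h2, hb, hp, List.set]

-- a foldl of min over equal lengths stays put
theorem pv_foldl_min_const (xs : List (List Int)) (n : Nat)
    (h : ∀ l ∈ xs, l.length = n) :
    xs.foldl (fun m l => min m l.length) n = n := by
  induction xs with
  | nil => rfl
  | cons x t ih =>
      simp only [List.foldl_cons, h x (by simp), min_self]
      exact ih (fun l hl => h l (by simp [hl]))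

-- zip length of B's padded columns is tab.length
theorem pv_ziplen (tab : List (List Int)) (nc : Nat) :
    pvZipLen (pvBorder ((List.range nc).map (fun j => tab.map (fun row => row.getD j 0))) tab.length)
      = tab.length := by
  unfold pvBorder pvZipLen
  simp only [List.cons_append, List.nil_append, List.length_replicate]
  apply pv_foldl_min_const
  intro l hl
  rcases List.mem_append.1 hl with h | h
  · rcases List.mem_map.1 h with ⟨j, _, rfl⟩; simp
  · simp only [List.mem_singleton] at h; simp [h]

-- getD through map, for an in-range index
theorem pv_getD_map (l : List (List Int)) (g : List Int → Int) (i : Nat)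
    (hi : i < l.length) :
    ((l.map g).getD i 0) = g (l.getD i []) := by
  rw [List.getD_eq_getElem _ _ (by simpa using hi), List.getD_eq_getElem _ _ hi]
  simp

-- with enough elements, range-indexed getD-map is take
theorem pv_map_range_take (row : List Int) (n : Nat) (hn : n ≤ row.length) :
    (List.range n).map (fun j => row.getD j 0) = row.take n := by
  induction n with
  | zero => simp
  | succ m ih =>
      have hm' : m < row.length := by omega
      rw [List.range_succ, List.map_append, ih (by omega)]
      have hg : row.getD m 0 = row[m] := List.getD_eq_getElem row 0 hm'
      simp only [List.map_cons, List.map_nil, hg]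
      rw [List.take_add_one]
      simp [List.getElem?_eq_getElem hm']

-- B's middle part (transpose of the padded columns) is the padded rows
theorem pv_trans (tab : List (List Int)) (nc : Nat)
    (h : ∀ row ∈ tab, nc ≤ row.length) :
    (List.range tab.length).map (fun i =>
        (pvBorder ((List.range nc).map (fun j => tab.map (fun row => row.getD j 0))) tab.length).map
          (fun c => c.getD i 0))
      = tab.map (fun row => [(0 : Int)] ++ row.take nc ++ [(0 : Int)]) := by
  rw [← pv_map_range_getD tab (fun row => [(0 : Int)] ++ row.take nc ++ [(0 : Int)])]
  apply List.map_congr_left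
  intro i hi
  have hi' : i < tab.length := by simpa using hi
  unfold pvBorder
  simp only [List.map_append, List.map_cons, List.map_nil, List.map_map]
  have hz : (List.replicate tab.length (0 : Int)).getD i 0 = 0 := by
    rw [List.getD_eq_getElem _ _ (by simpa using hi')]; simp
  rw [hz]
  congr 1
  congr 1
  have hmid : (List.range nc).map
      ((fun c => c.getD i 0) ∘ fun j => tab.map (fun row => row.getD j 0))
      = (List.range nc).map (fun j => (tab.getD i []).getD j 0) := by
    apply List.map_congr_left
    intro j _
    exact pv_getD_map tab (fun row => row.getD j 0) i hi'
  rw [hmid, pv_map_range_take _ _ (h _ (by rw [List.getD_eq_getElem _ _ hi']; exact List.getElem_mem hi'))]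

-- ===== VERDICT (by name: the statement is the Claim_ definition above) =====
theorem ajoute_couronne_spec : Claim_equal_ajoute_couronne := by
  intro tab _ hpre
  obtain ⟨hne, hrows⟩ := hpre
  unfold Spec_ajoute_couronne ajoute_couronne ajoute_couronne_alt
  simp only []
  rw [show ((List.range (tab.length + 2)).map
        (fun _ => (List.range ((tab.headD []).length + 2)).map (fun _ => (0 : Int))))
      = List.replicate (tab.length + 2)
          (List.replicate ((tab.headD []).length + 2) (0 : Int)) by
    simp [List.map_const']]
  rw [pv_outer tab (tab.headD []).length tab.length (le_refl _)]
  rw [pv_ziplen tab (tab.headD []).length]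
  rw [pv_trans tab (tab.headD []).length hrows]
  have hlast : List.replicate (tab.length + 1 - tab.length)
        (List.replicate ((tab.headD []).length + 2) (0 : Int))
      = [List.replicate ((tab.headD []).length + 2) (0 : Int)] := by
    have : tab.length + 1 - tab.length = 1 := by omega
    rw [this]; rfl
  rw [hlast]
  unfold pvBorder
  congr 1
  congr 1
  rw [← pv_map_range_getD tab (fun row => [(0 : Int)] ++ row.take (tab.headD []).length ++ [(0 : Int)])]
  apply List.map_congr_left
  intro i hi
  have hi' : i < tab.length := by simpa using hi
  rw [pv_map_range_take _ _ (hrows _ (by rw [List.getD_eq_getElem _ _ hi']; exact List.getElem_mem hi'))]
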